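-- pv_equiv track=rewrite | github.com/devMingu/codeTest | 프로그래머스/skt2.py | solution
-- ===== SOURCE A (Python) =====
-- def solution(p):
--     n = len(p)
--     i = 0
--     answer = [0]*n
--     while i < n:
--         min_value = min(p[i:n])
--         j = p.index(min_value)
--         if j != i:
--             temp = p[j]
--             p[j] = p[i]
--             p[i] = temp
--             answer[i] += 1
--             answer[j] += 1
--         i += 1
--     return answer
-- ===== SOURCE B (Python) =====
-- def solution(p):
--     # Cycle-decomposition approach: sort once to get each value's target rank,
--     # then walk the position<->rank permutation, fixing one position per step.
--     # Requires distinct values (each value has a unique rank).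
--     n = len(p)
--     s = sorted(p)
--     rank = {}
--     for r, v in enumerate(s):
--         rank[v] = r
--     dest = [0] * n          # dest[i]: rank of the value currently at position i
--     src = [0] * n           # src[r]: position currently holding the value of rank r
--     for i, v in enumerate(p):
--         r = rank[v]
--         dest[i] = r
--         src[r] = i
--     answer = [0] * n
--     for i in range(n):
--         j = src[i]
--         if j != i:
--             answer[i] += 1
--             answer[j] += 1
--             d = dest[i]
--             dest[j] = d
--             src[d] = j
--             dest[i] = i
--             src[i] = i
--     return answer
-- ===== Notes on version B (the rewrite author's own statement) =====
-- stated objective: alternative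
-- what changed: Replaces the per-step suffix-min and global .index scans by one sort assigning each value its rank plus a walk of the position/rank permutation fixing one position per step (O(n log n) vs O(n^2)); Pre_ excludes lists with repeated values, where which equal occurrence of the minimum gets swapped and counted is unspecified tie-breaking and the two choices diverge.
-- outside the precondition, e.g. on solution([1, 1]): A returns [1, 1], B returns [0, 0]; on solution([2, 1, 1]): A returns [2, 3, 1], B returns [1, 1, 2]
import Mathlib
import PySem

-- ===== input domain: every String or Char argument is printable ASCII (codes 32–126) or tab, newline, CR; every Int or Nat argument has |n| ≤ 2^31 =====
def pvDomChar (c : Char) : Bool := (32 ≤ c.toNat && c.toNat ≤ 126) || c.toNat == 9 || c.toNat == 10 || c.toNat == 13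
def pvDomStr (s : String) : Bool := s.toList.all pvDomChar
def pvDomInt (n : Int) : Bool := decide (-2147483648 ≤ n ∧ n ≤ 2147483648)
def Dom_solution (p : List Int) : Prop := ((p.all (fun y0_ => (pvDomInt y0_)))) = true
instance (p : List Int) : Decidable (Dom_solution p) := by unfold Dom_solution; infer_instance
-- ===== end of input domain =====

-- B sorts once and walks the position/rank permutation cycle by cycle instead of
-- rescanning the suffix each step (objective: alternative). A mutates its argument
-- in place, B does not: the equivalence proved here is about the RETURN value only.

-- ===== PORT A =====
-- while i < n: min over p[i:n], j = first global index of that min, conditional swap + counts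
def loopA (p ans : List Int) (n i : Nat) : List Int :=
  if _h : i < n then
    match PySem.List.min? (PySem.List.slice p (some (i : Int)) (some (n : Int))) (fun x => x) with
    | none => ans   -- unreachable: i < n = len p, so the slice is nonempty (Python min never raises here)
    | some mv =>
      match PySem.List.index? p mv with
      | none => ans -- unreachable: the min is a member of p
      | some j =>
        if j ≠ i then
          let temp := p.getD j 0
          let p' := (p.set j (p.getD i 0)).set i temp
          let a1 := ans.set i (ans.getD i 0 + 1)
          let a2 := a1.set j (a1.getD j 0 + 1)
          loopA p' a2 n (i + 1)
        else
          loopA p ans n (i + 1)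
  else ans
termination_by n - i
decreasing_by all_goals omega

def solution (p : List Int) : List Int :=
  loopA p (List.replicate p.length 0) p.length 0

-- ===== PORT B =====
-- final loop of Source B: j = src[i]; if j != i: count both, move dest/src entries, fix i
-- (j = src[i] is a nonnegative in-range int whenever the init loop built src, so
--  indexing answer[j]/dest[j]/src[d] is ported with .toNat)
def loopB (dest src ans : List Int) (n i : Nat) : List Int :=
  if _h : i < n then
    let j := src.getD i 0
    if j ≠ (i : Int) then
      let ans1 := ans.set i (ans.getD i 0 + 1)
      let ans2 := ans1.set j.toNat (ans1.getD j.toNat 0 + 1)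
      let d := dest.getD i 0
      let dest1 := (dest.set j.toNat d).set i (i : Int)
      let src1 := (src.set d.toNat j).set i (i : Int)
      loopB dest1 src1 ans2 n (i + 1)
    else
      loopB dest src ans n (i + 1)
  else ans
termination_by n - i
decreasing_by all_goals omega

-- rank = {v: r for r, v in enumerate(s)}; then one pass over p filling dest and src.
-- (rank[v] never raises KeyError — v is an element of p, hence of s = sorted(p) —
--  so the lookup is ported as getD)
def solution_alt (p : List Int) : List Int :=
  let n := p.length
  let s := PySem.List.sorted p (fun x => x)
  let rank := (PySem.List.enumerate s).foldl (fun d rv => d.insert rv.2 rv.1) PySem.Dict.empty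
  let ds := (PySem.List.enumerate p).foldl
      (fun st iv =>
        let r := rank.getD iv.2 0
        (st.1.set iv.1.toNat r, st.2.set r.toNat iv.1))
      (List.replicate n (0 : Int), List.replicate n (0 : Int))
  loopB ds.1 ds.2 (List.replicate n (0 : Int)) n 0

-- ===== PRECONDITION & SPEC =====
-- Pre_ excludes lists with repeated values: counting selection-sort swaps is only
-- well-defined up to the tie-break among equal minima (A swaps with the globally first
-- equal occurrence, B with the one its rank permutation designates), and no caller
-- would specify either count, so the duplicate corner is left out.
def Pre_solution (p : List Int) : Prop := p.Nodup
instance (p : List Int) : Decidable (Pre_solution p) := by unfold Pre_solution; infer_instance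

def pvWitness_solution : List Int := [3, 1, 2]

def Spec_solution (p : List Int) (out : List Int) : Prop := out = solution_alt p
instance (p : List Int) (out : List Int) : Decidable (Spec_solution p out) := by unfold Spec_solution; infer_instance

-- ===== CLAIM (what is proved, stated in full; the proofs are below) =====
def Claim_equal_solution : Prop := ∀ (p : List Int), Dom_solution p → Pre_solution p → Spec_solution p (solution p)

-- ===== LEMMAS AND PROOFS =====

lemma getD_set_self (l : List Int) (i : Nat) (v : Int) (h : i < l.length) :
    (l.set i v).getD i 0 = v := by
  simp [List.getD_eq_getElem?_getD, h]

lemma getD_set_ne (l : List Int) (i j : Nat) (v : Int) (h : i ≠ j) :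
    (l.set i v).getD j 0 = l.getD j 0 := by
  simp [List.getD_eq_getElem?_getD, List.getElem?_set_ne h]

lemma getD_append_left (l t : List Int) (k : Nat) (h : k < l.length) :
    (l ++ t).getD k 0 = l.getD k 0 := by
  simp [List.getD_eq_getElem?_getD, List.getElem?_append_left h]

lemma getD_append_self (l : List Int) (v : Int) :
    (l ++ [v]).getD l.length 0 = v := by
  simp [List.getD_eq_getElem?_getD]

lemma getD_mem_of_lt' (l : List Int) (k : Nat) (h : k < l.length) : l.getD k 0 ∈ l := by
  rw [List.getD_eq_getElem l 0 h]; exact List.getElem_mem h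

-- the rank dict: with s nodup, looking up s[k] yields k
lemma rank_spec : ∀ (s : List Int), s.Nodup → ∀ k, k < s.length →
    (((PySem.List.enumerate s).foldl (fun d rv => d.insert rv.2 rv.1) PySem.Dict.empty).getD
      (s.getD k 0) 0) = (k : Int) := by
  intro s
  induction s using List.reverseRecOn with
  | nil => intro _ k hk; simp at hk
  | append_singleton l v ih =>
    intro hnd k hk
    have hnl : l.Nodup := (List.nodup_append.mp hnd).1
    have hvl : v ∉ l := by
      intro hm
      have h1 := List.nodup_iff_count_le_one.mp hnd v
      rw [List.count_append] at h1
      have h2 : 0 < l.count v := List.count_pos_iff.mpr hm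
      simp at h1
      omega
    rw [PySem.List.enumerate_append, List.foldl_append]
    simp only [PySem.List.enumerate_cons, PySem.List.enumerate_nil, List.foldl_cons, List.foldl_nil]
    rcases Nat.lt_or_ge k l.length with hkl | hkl
    · rw [getD_append_left l [v] k hkl]
      have hne : l.getD k 0 ≠ v := by
        intro he
        exact hvl (he ▸ getD_mem_of_lt' l k hkl)
      rw [PySem.Dict.getD_insert_of_ne _ _ _ hne]
      exact ih hnl k hkl
    · have hk' : k = l.length := by simp at hk; omega
      subst hk'
      rw [getD_append_self, PySem.Dict.getD_insert_self]
      omega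
-- the init loop of Source B: dest[t] = g(p[t]) for every position t, and (g injective on
-- positions) src[g(p[t])] = t; lengths are preserved
lemma init_spec (g : Int → Int) : ∀ (q dest0 src0 : List Int),
    (∀ t, t < q.length → 0 ≤ g (q.getD t 0) ∧ (g (q.getD t 0)).toNat < src0.length) →
    (∀ t1 t2, t1 < q.length → t2 < q.length → g (q.getD t1 0) = g (q.getD t2 0) → t1 = t2) →
    (q.length ≤ dest0.length) →
    (let F := (PySem.List.enumerate q).foldl
        (fun st iv => (st.1.set iv.1.toNat (g iv.2), st.2.set (g iv.2).toNat iv.1))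
        (dest0, src0)
     F.1.length = dest0.length ∧ F.2.length = src0.length ∧
     (∀ t, t < q.length → F.1.getD t 0 = g (q.getD t 0)) ∧
     (∀ t, t < q.length → F.2.getD (g (q.getD t 0)).toNat 0 = (t : Int))) := by
  intro q
  induction q using List.reverseRecOn with
  | nil => intro dest0 src0 _ _ _; exact ⟨rfl, rfl, by simp, by simp⟩
  | append_singleton l v ih =>
    intro dest0 src0 hrange hinj hlen
    have hgd : ∀ t, t < l.length → l.getD t 0 = (l ++ [v]).getD t 0 := by
      intro t ht; rw [getD_append_left l [v] t ht]
    have hgv : (l ++ [v]).getD l.length 0 = v := getD_append_self l v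
    have hrange' : ∀ t, t < l.length → 0 ≤ g (l.getD t 0) ∧ (g (l.getD t 0)).toNat < src0.length := by
      intro t ht; rw [hgd t ht]; exact hrange t (by simp; omega)
    have hinj' : ∀ t1 t2, t1 < l.length → t2 < l.length →
        g (l.getD t1 0) = g (l.getD t2 0) → t1 = t2 := by
      intro t1 t2 h1 h2 he
      rw [hgd t1 h1, hgd t2 h2] at he
      exact hinj t1 t2 (by simp; omega) (by simp; omega) he
    obtain ⟨hL1, hL2, hdest, hsrc⟩ := ih dest0 src0 hrange' hinj' (by simp at hlen; omega)
    rw [PySem.List.enumerate_append, List.foldl_append]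
    simp only [PySem.List.enumerate_cons, PySem.List.enumerate_nil, List.foldl_cons, List.foldl_nil,
      zero_add]
    set F := (PySem.List.enumerate l).foldl
        (fun st iv => (st.1.set iv.1.toNat (g iv.2), st.2.set (g iv.2).toNat iv.1))
        (dest0, src0) with hF
    refine ⟨by simp [hL1], by simp [hL2], ?_, ?_⟩
    · intro t ht
      simp only [List.length_append, List.length_singleton] at ht
      rcases Nat.lt_or_ge t l.length with htl | htl
      · rw [getD_set_ne _ _ _ _ (by simp; omega), ← hgd t htl]
        exact hdest t htl
      · have ht' : t = l.length := by omega
        subst ht'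
        have : ((l.length : Int)).toNat = l.length := by simp
        rw [this, getD_set_self _ _ _ (by rw [hL1]; simp at hlen; omega), hgv]
    · intro t ht
      simp only [List.length_append, List.length_singleton] at ht
      rcases Nat.lt_or_ge t l.length with htl | htl
      · rw [← hgd t htl, getD_set_ne]
        · exact hsrc t htl
        · -- (g v).toNat ≠ (g (l[t])).toNat since g injective on positions of l ++ [v]
          intro he
          have h1 := hrange t (by simp; omega)
          have h2 := hrange l.length (by simp)
          rw [← hgd t htl] at h1
          rw [hgv] at h2
          have : g v = g (l.getD t 0) := by omega
          have := hinj l.length t (by simp) (by simp; omega) (by rw [hgv, ← hgd t htl]; exact this)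
          omega
      · have ht' : t = l.length := by omega
        subst ht'
        rw [hgv, getD_set_self]
        rw [hL2]
        have := hrange l.length (by simp)
        rw [hgv] at this
        omega

-- one step of A: with the invariant, min(q[i:]) is s[i] and its first index in q is src[i]
lemma min_step (s q : List Int) (n i : Nat) (hsl : s.length = n) (hq : q.length = n)
    (hi : i < n)
    (Hmono : ∀ a b : Nat, a ≤ b → b < n → s.getD a 0 ≤ s.getD b 0)
    (hlow : ∀ y ∈ q.drop i, s.getD i 0 ≤ y)
    (hmem : s.getD i 0 ∈ q.drop i) :
    PySem.List.min? (PySem.List.slice q (some (i : Int)) (some (n : Int))) (fun x => x)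
      = some (s.getD i 0) := by
  have hsl' : PySem.List.slice q (some (i : Int)) (some (n : Int)) = q.drop i := by
    rw [PySem.List.slice_natCast]
    exact List.take_of_length_le (by simp; omega)
  have hdc : q.drop i = q[i]'(by omega) :: q.drop (i + 1) := List.drop_eq_getElem_cons (by omega)
  rw [hsl', hdc, PySem.List.min?_id_cons]
  have hF := PySem.List.foldl_min_le (q.drop (i + 1)) (q[i]'(by omega))
  have hFm := PySem.List.foldl_min_mem (q.drop (i + 1)) (q[i]'(by omega))
  have h1 : (q.drop (i + 1)).foldl min (q[i]'(by omega)) ≤ s.getD i 0 := by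
    rw [hdc] at hmem
    rcases List.mem_cons.mp hmem with h | h
    · rw [h]; exact hF.1
    · exact hF.2 _ h
  have h2 : s.getD i 0 ≤ (q.drop (i + 1)).foldl min (q[i]'(by omega)) := by
    apply hlow
    rw [hdc]
    rcases hFm with h | h
    · rw [h]; exact List.mem_cons_self
    · exact List.mem_cons_of_mem _ h
  rw [le_antisymm h1 h2]

lemma index_step (q : List Int) (v : Int) (j : Nat) (hj : j < q.length)
    (hjv : q.getD j 0 = v) (hfirst : ∀ t, t < j → q.getD t 0 ≠ v) :
    PySem.List.index? q v = some j := by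
  rw [PySem.List.index?_eq_some_iff]
  refine ⟨q.take j, q.drop (j + 1), ?_, by simp; omega, ?_⟩
  · conv_lhs => rw [← List.take_append_drop j q]
    congr 1
    rw [List.drop_eq_getElem_cons hj]
    congr 1
    rw [← List.getD_eq_getElem q 0 hj]; exact hjv
  · intro hc
    obtain ⟨t, ht, hty⟩ := List.mem_iff_getElem.mp hc
    have ht2 : t < j := by simp at ht; omega
    have : (q.take j)[t]'ht = q[t]'(by omega) := List.getElem_take ..
    rw [this] at hty
    exact hfirst t ht2 (by rw [List.getD_eq_getElem q 0 (by omega)]; exact hty)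

-- the main synchronisation: A's selection loop equals B's permutation walk
lemma loop_sync (s : List Int) (n : Nat) (hsl : s.length = n)
    (Hmono : ∀ a b : Nat, a ≤ b → b < n → s.getD a 0 ≤ s.getD b 0)
    (Hinj : ∀ a b : Nat, a < n → b < n → s.getD a 0 = s.getD b 0 → a = b) :
    ∀ (f i : Nat) (q dest src ans : List Int),
    n - i = f → q.length = n → dest.length = n → src.length = n →
    (∀ t, t < n → 0 ≤ dest.getD t 0 ∧ (dest.getD t 0).toNat < n) →
    (∀ t, t < n → q.getD t 0 = s.getD (dest.getD t 0).toNat 0) →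
    (∀ r, r < n → 0 ≤ src.getD r 0 ∧ (src.getD r 0).toNat < n) →
    (∀ r, r < n → dest.getD (src.getD r 0).toNat 0 = (r : Int)) →
    (∀ t, t < n → src.getD (dest.getD t 0).toNat 0 = (t : Int)) →
    (∀ t, t < i → dest.getD t 0 = (t : Int)) →
    loopA q ans n i = loopB dest src ans n i := by
  intro f
  induction f with
  | zero =>
    intro i q dest src ans hf _ _ _ _ _ _ _ _ _
    rw [loopA, loopB, dif_neg (by omega : ¬ i < n), dif_neg (by omega : ¬ i < n)]
  | succ f ihf =>
    intro i q dest src ans hf hq hd hs Hd0 Ha Hs0 Hb1 Hb2 Hc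
    have hi : i < n := by omega
    -- names for the moved entries
    set jI := src.getD i 0 with hjI
    have hj0 : 0 ≤ jI ∧ jI.toNat < n := Hs0 i hi
    set j := jI.toNat with hjdef
    have hjI_eq : jI = (j : Int) := by omega
    have hdj : dest.getD j 0 = (i : Int) := Hb1 i hi
    have hij : i ≤ j := by
      by_contra hlt
      have := Hc j (by omega)
      rw [this] at hdj
      omega
    -- σ maps [i, n) into [i, n)
    have hsig : ∀ t, i ≤ t → t < n → i ≤ (dest.getD t 0).toNat := by
      intro t hit htn
      by_contra hlt
      set u := (dest.getD t 0).toNat with hu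
      have hcu := Hc u (by omega)
      have h1 := Hb2 t htn
      have h2 := Hb2 u (by omega)
      rw [hcu] at h2
      simp only [Int.toNat_natCast] at h2
      rw [← hu] at h1
      rw [h1] at h2
      omega
    -- A's min and index
    have hmin : PySem.List.min? (PySem.List.slice q (some (i : Int)) (some (n : Int))) (fun x => x)
        = some (s.getD i 0) := by
      apply min_step s q n i hsl hq hi Hmono
      · intro y hy
        obtain ⟨k, hk, hky⟩ := List.mem_iff_getElem.mp hy
        have hkq : i + k < n := by simp at hk; omega
        have : (q.drop i)[k]'hk = q[i + k]'(by omega) := List.getElem_drop ..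
        rw [this] at hky
        rw [← hky, ← List.getD_eq_getElem q 0 (by omega), Ha (i + k) hkq]
        exact Hmono i _ (hsig (i + k) (by omega) hkq) (Hd0 (i + k) hkq).2
      · have hqj : q.getD j 0 = s.getD i 0 := by
          rw [Ha j hj0.2, hdj]; simp
        have : (q.drop i)[j - i]'(by simp; omega) = q[j]'(by omega) := by
          rw [List.getElem_drop]; congr 1; omega
        rw [← hqj, List.getD_eq_getElem q 0 (by omega), ← this]
        exact List.getElem_mem _
    have hidx : PySem.List.index? q (s.getD i 0) = some j := by
      apply index_step q _ j (by omega)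
      · rw [Ha j hj0.2, hdj]; simp
      · intro t htj he
        have htn : t < n := by omega
        have := Ha t htn
        rw [this] at he
        have hteq := Hinj _ i (Hd0 t htn).2 hi he
        have := Hb2 t htn
        rw [hteq] at this
        rw [← hjI] at this
        omega
    -- unfold both loops one step
    rw [loopA, loopB, dif_pos hi, dif_pos hi, hmin]
    dsimp only
    rw [hidx]
    dsimp only
    simp only [← hjI]
    by_cases hji : j = i
    · -- no swap on either side
      rw [if_neg (by omega : ¬ j ≠ i), if_neg (show ¬ (jI ≠ (i : Int)) by omega)]
      apply ihf (i + 1) q dest src ans (by omega) hq hd hs Hd0 Ha Hs0 Hb1 Hb2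
      intro t ht
      rcases Nat.lt_or_ge t i with h | h
      · exact Hc t h
      · have : t = i := by omega
        subst this
        rw [← hji] at hdj ⊢
        exact hdj.trans (by omega)
    · -- swap on both sides
      have hij' : i < j := by omega
      set dI := dest.getD i 0 with hdI
      have hu0 := Hd0 i hi
      set u := dI.toNat with hu
      have hdI_eq : dI = (u : Int) := by omega
      have hui : u ≠ i := by
        intro he
        have h2 := Hb2 i hi
        rw [← hdI, ← hu, he] at h2
        rw [← hjI] at h2
        omega
      rw [if_pos (by omega : j ≠ i), if_pos (show jI ≠ (i : Int) by omega)]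
      simp only [← hjdef]
      have hu0' : 0 ≤ dI ∧ dI.toNat < n := by rw [hdI]; exact Hd0 i hi
      have hdI_eq : dI = (u : Int) := by omega
      -- getD of a double set, fully case-split
      have hset : ∀ (l : List Int) (a b : Nat) (va vb : Int), a < l.length → b < l.length →
          (∀ t : Nat, ((l.set a va).set b vb).getD t 0 =
            if t = b then vb else if t = a then va else l.getD t 0) := by
        intro l a b va vb ha hb t
        rcases eq_or_ne t b with rfl | h1
        · rw [getD_set_self _ _ _ (by simpa using hb), if_pos rfl]
        · rw [getD_set_ne _ _ _ _ (Ne.symm h1), if_neg h1]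
          rcases eq_or_ne t a with rfl | h2
          · rw [getD_set_self _ _ _ ha, if_pos rfl]
          · rw [getD_set_ne _ _ _ _ (Ne.symm h2), if_neg h2]
      have hgq' := hset q j i (q.getD i 0) (q.getD j 0) (by omega) (by omega)
      have hgd' := hset dest j i dI ((i : Int)) (by omega) (by omega)
      have hgs' := hset src u i jI ((i : Int)) (by omega) (by omega)
      apply ihf (i + 1) ((q.set j (q.getD i 0)).set i (q.getD j 0))
        ((dest.set j dI).set i (i : Int))
        ((src.set u jI).set i (i : Int)) _ (by omega)
      · simp [hq]
      · simp [hd]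
      · simp [hs]
      · -- Hd0'
        intro t htn
        rw [hgd' t]
        split_ifs with h1 h2
        · exact ⟨by omega, by simp; omega⟩
        · exact hu0'
        · exact Hd0 t htn
      · -- Ha'
        intro t htn
        rw [hgq' t, hgd' t]
        split_ifs with h1 h2
        · simp only [Int.toNat_natCast]
          rw [Ha j hj0.2, hdj]
          simp
        · rw [hdI]
          exact Ha i hi
        · exact Ha t htn
      · -- Hs0'
        intro r hrn
        rw [hgs' r]
        split_ifs with h1 h2
        · exact ⟨by omega, by simp; omega⟩
        · exact hj0
        · exact Hs0 r hrn
      · -- Hb1'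
        intro r hrn
        rw [hgs' r]
        split_ifs with h1 h2
        · rw [h1]
          simp only [Int.toNat_natCast]
          rw [hgd' i, if_pos rfl]
        · rw [h2]
          rw [← hjdef, hgd' j, if_neg (by omega : ¬ j = i), if_pos rfl]
          exact hdI_eq
        · have hb := Hb1 r hrn
          have ht1 : (src.getD r 0).toNat ≠ i := by
            intro he
            rw [he] at hb
            have : dI = (r : Int) := by rw [hdI]; exact hb
            omega
          have ht2 : (src.getD r 0).toNat ≠ j := by
            intro he
            rw [he, hdj] at hb
            omega
          rw [hgd' _, if_neg ht1, if_neg ht2]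
          exact hb
      · -- Hb2'
        intro t htn
        rw [hgd' t]
        split_ifs with h1 h2
        · rw [h1]
          simp only [Int.toNat_natCast]
          rw [hgs' i, if_pos rfl]
        · rw [h2]
          rw [← hu, hgs' u, if_neg hui, if_pos rfl]
          rw [hjI_eq]
        · have hb := Hb2 t htn
          have ht1 : (dest.getD t 0).toNat ≠ i := by
            intro he
            rw [he] at hb
            have : jI = (t : Int) := by rw [hjI]; exact hb
            omega
          have ht2 : (dest.getD t 0).toNat ≠ u := by
            intro he
            have hbi : src.getD u 0 = (i : Int) := by
              rw [hu, hdI]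
              exact Hb2 i hi
            rw [he, hbi] at hb
            omega
          rw [hgs' _, if_neg ht1, if_neg ht2]
          exact hb
      · -- Hc'
        intro t ht
        rcases Nat.lt_or_ge t i with h | h
        · rw [hgd' t, if_neg (by omega), if_neg (by omega)]
          exact Hc t h
        · have hti : t = i := by omega
          rw [hti, hgd' i, if_pos rfl]

-- ===== VERDICT (by name: the statement is the Claim_ definition above) =====
theorem solution_spec : Claim_equal_solution := by
  intro p _ hpre
  unfold Spec_solution solution solution_alt
  simp only
  set n := p.length with hn
  set s := PySem.List.sorted p (fun x => x) with hs
  have hperm : s.Perm p := PySem.List.sorted_perm p (fun x => x) false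
  have hsl : s.length = n := hperm.length_eq
  have hsnd : s.Nodup := hperm.nodup_iff.mpr hpre
  have Hmono : ∀ a b : Nat, a ≤ b → b < n → s.getD a 0 ≤ s.getD b 0 := by
    intro a b hab hbn
    rw [List.getD_eq_getElem s 0 (by omega), List.getD_eq_getElem s 0 (by omega)]
    exact PySem.List.sorted_id_getElem_mono p hab (by rw [← hs, hsl]; omega)
  have Hinj : ∀ a b : Nat, a < n → b < n → s.getD a 0 = s.getD b 0 → a = b := by
    intro a b ha hb he
    rw [List.getD_eq_getElem s 0 (by omega), List.getD_eq_getElem s 0 (by omega)] at he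
    exact (List.Nodup.getElem_inj_iff hsnd).mp he
  set rank := (PySem.List.enumerate s).foldl (fun d rv => d.insert rv.2 rv.1) PySem.Dict.empty
    with hrank
  have hrk : ∀ k, k < n → rank.getD (s.getD k 0) 0 = (k : Int) := by
    intro k hk
    exact rank_spec s hsnd k (by omega)
  set g : Int → Int := fun v => rank.getD v 0 with hg
  -- each position t of p has a unique rank k_t with s[k_t] = p[t] and g(p[t]) = k_t
  have hkex : ∀ t, t < n → ∃ k, k < n ∧ s.getD k 0 = p.getD t 0 ∧ g (p.getD t 0) = (k : Int) := by
    intro t htn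
    have hm : p.getD t 0 ∈ s := hperm.mem_iff.mpr (getD_mem_of_lt' p t (by omega))
    obtain ⟨k, hk, hkv⟩ := List.mem_iff_getElem.mp hm
    refine ⟨k, by omega, by rw [List.getD_eq_getElem s 0 hk]; exact hkv, ?_⟩
    rw [hg]
    have : s.getD k 0 = p.getD t 0 := by rw [List.getD_eq_getElem s 0 hk]; exact hkv
    rw [← this]
    exact hrk k (by omega)
  have hpinj : ∀ a b : Nat, a < n → b < n → p.getD a 0 = p.getD b 0 → a = b := by
    intro a b ha hb he
    rw [List.getD_eq_getElem p 0 (by omega), List.getD_eq_getElem p 0 (by omega)] at he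
    exact (List.Nodup.getElem_inj_iff hpre).mp he
  have hginj : ∀ t1 t2, t1 < p.length → t2 < p.length →
      g (p.getD t1 0) = g (p.getD t2 0) → t1 = t2 := by
    intro t1 t2 h1 h2 he
    obtain ⟨k1, hk1, hv1, hg1⟩ := hkex t1 (by omega)
    obtain ⟨k2, hk2, hv2, hg2⟩ := hkex t2 (by omega)
    rw [hg1, hg2] at he
    have : k1 = k2 := by omega
    subst this
    exact hpinj t1 t2 (by omega) (by omega) (by rw [← hv1, ← hv2])
  have hgrange : ∀ t, t < p.length →
      0 ≤ g (p.getD t 0) ∧ (g (p.getD t 0)).toNat < (List.replicate n (0 : Int)).length := by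
    intro t ht
    obtain ⟨k, hk, _, hgk⟩ := hkex t (by omega)
    rw [hgk]; simp; omega
  have hinit := init_spec g p (List.replicate n (0 : Int)) (List.replicate n (0 : Int))
    hgrange hginj (by simp [hn])
  simp only at hinit
  set F := (PySem.List.enumerate p).foldl
      (fun st iv => (st.1.set iv.1.toNat (g iv.2), st.2.set (g iv.2).toNat iv.1))
      (List.replicate n (0 : Int), List.replicate n (0 : Int)) with hF
  obtain ⟨hL1, hL2, hdest, hsrc⟩ := hinit
  -- establish the loop invariant at i = 0 and synchronise
  apply loop_sync s n hsl Hmono Hinj (n - 0) 0 p F.1 F.2 _ rfl rfl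
      (by rw [hL1]; simp) (by rw [hL2]; simp)
  · intro t htn
    obtain ⟨k, hk, _, hgk⟩ := hkex t htn
    rw [hdest t (by omega), hgk]
    simp; omega
  · intro t htn
    obtain ⟨k, hk, hkv, hgk⟩ := hkex t htn
    rw [hdest t (by omega), hgk]
    simp only [Int.toNat_natCast]
    exact hkv.symm
  · intro r hrn
    -- surjectivity: s[r] occurs in p at some position t, and g(p[t]) = r
    have hm : s.getD r 0 ∈ p := hperm.mem_iff.mp (getD_mem_of_lt' s r (by omega))
    obtain ⟨t, ht, htv⟩ := List.mem_iff_getElem.mp hm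
    have htv' : p.getD t 0 = s.getD r 0 := by rw [List.getD_eq_getElem p 0 ht]; exact htv
    have hgt : g (p.getD t 0) = (r : Int) := by rw [htv', hg]; exact hrk r hrn
    have := hsrc t (by omega)
    rw [hgt] at this
    simp only [Int.toNat_natCast] at this
    rw [this]
    refine ⟨by omega, by simp; omega⟩
  · intro r hrn
    have hm : s.getD r 0 ∈ p := hperm.mem_iff.mp (getD_mem_of_lt' s r (by omega))
    obtain ⟨t, ht, htv⟩ := List.mem_iff_getElem.mp hm
    have htv' : p.getD t 0 = s.getD r 0 := by rw [List.getD_eq_getElem p 0 ht]; exact htv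
    have hgt : g (p.getD t 0) = (r : Int) := by rw [htv', hg]; exact hrk r hrn
    have hsr := hsrc t (by omega)
    rw [hgt] at hsr
    simp only [Int.toNat_natCast] at hsr
    rw [hsr]
    simp only [Int.toNat_natCast]
    rw [hdest t (by omega), hgt]
  · intro t htn
    obtain ⟨k, hk, _, hgk⟩ := hkex t htn
    rw [hdest t htn, hgk]
    simp only [Int.toNat_natCast]
    have := hsrc t htn
    rw [hgk] at this
    simp only [Int.toNat_natCast] at this
    exact this
  · intro t ht; omega
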